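-- pv_equiv track=rewrite | github.com/Uscera-Liberty/chislaki_2.0 | python_course/lab1.py | zadacha14_8
-- ===== SOURCE A (Python) =====
-- def zadacha14_8(s):
--     mx = 0
--     cur = 0
--     for ch in s:
--         if ch.isdigit():
--             cur += 1
--             mx = max(cur, mx)
--         else:
--             cur = 0
--     return mx
-- ===== SOURCE B (Python) =====
-- from itertools import groupby
--
-- def zadacha14_8(s):
--     return max((sum(1 for _ in g) for k, g in groupby(s, key=str.isdigit) if k), default=0)
-- ===== Notes on version B (the rewrite author's own statement) =====
-- stated objective: idiomatic
-- what changed: Replaces the running counter/max loop by itertools.groupby partitioning the string into maximal same-class runs and taking the max length over the digit runs (default 0).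
import Mathlib
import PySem

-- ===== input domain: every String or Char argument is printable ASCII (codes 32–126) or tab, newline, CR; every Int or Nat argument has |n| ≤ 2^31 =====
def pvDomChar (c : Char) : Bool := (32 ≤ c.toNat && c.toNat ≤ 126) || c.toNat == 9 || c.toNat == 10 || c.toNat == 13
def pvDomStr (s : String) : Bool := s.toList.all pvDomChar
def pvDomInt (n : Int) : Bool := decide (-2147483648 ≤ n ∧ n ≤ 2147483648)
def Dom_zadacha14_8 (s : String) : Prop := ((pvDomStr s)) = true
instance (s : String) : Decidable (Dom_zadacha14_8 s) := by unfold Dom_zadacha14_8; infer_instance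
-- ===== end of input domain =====

-- B is the idiomatic groupby formulation: partition the string into maximal same-class runs,
-- then take the max length over the digit runs (default 0). Same O(n) cost, different decomposition.

-- ===== PORT A =====
-- running counter/max fold, state (mx, cur)
def zadacha14_8 (s : String) : Int :=
  (s.toList.foldl
    (fun (st : Int × Int) ch =>
      if PySem.Chars.isdigit ch then (max (st.2 + 1) st.1, st.2 + 1) else (st.1, 0))
    (0, 0)).1

-- ===== PORT B =====
-- groupby: list of maximal runs, keep digit runs' lengths, reduce with max (default 0)
def pvDigitRunLens : List Char → List Nat
  | [] => []
  | c :: rest =>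
    let grp := rest.takeWhile (fun x => PySem.Chars.isdigit x == PySem.Chars.isdigit c)
    let rest' := rest.dropWhile (fun x => PySem.Chars.isdigit x == PySem.Chars.isdigit c)
    if PySem.Chars.isdigit c then (1 + grp.length) :: pvDigitRunLens rest'
    else pvDigitRunLens rest'
termination_by l => l.length
decreasing_by
  all_goals
    simp only [List.length_cons]
    exact Nat.lt_succ_of_le (List.length_dropWhile_le _ _)

def zadacha14_8_alt (s : String) : Int :=
  ((pvDigitRunLens s.toList).foldl max 0 : Nat)

-- ===== PRECONDITION & SPEC =====
def Spec_zadacha14_8 (s : String) (out : Int) : Prop := out = zadacha14_8_alt s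
instance (s : String) (out : Int) : Decidable (Spec_zadacha14_8 s out) := by unfold Spec_zadacha14_8; infer_instance

-- ===== CLAIM (what is proved, stated in full; the proofs are below) =====
def Claim_equal_zadacha14_8 : Prop := ∀ (s : String), Dom_zadacha14_8 s → Spec_zadacha14_8 s (zadacha14_8 s)

-- ===== LEMMAS AND PROOFS =====

-- Nat shadow of A's fold state
def pvBestPair : Nat → Nat → List Char → Nat × Nat
  | mx, cur, [] => (mx, cur)
  | mx, cur, c :: t =>
    if PySem.Chars.isdigit c then pvBestPair (max (cur + 1) mx) (cur + 1) t
    else pvBestPair mx 0 t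

-- max run length given we start inside a run of current length cur
def pvM : Nat → List Char → Nat
  | cur, [] => cur
  | cur, c :: t => if PySem.Chars.isdigit c then pvM (cur + 1) t else max cur (pvM 0 t)

theorem pvM_ge (l : List Char) : ∀ cur, cur ≤ pvM cur l := by
  induction l with
  | nil => intro cur; simp [pvM]
  | cons c t ih =>
    intro cur
    simp only [pvM]
    split
    · exact le_trans (Nat.le_succ cur) (ih (cur + 1))
    · exact Nat.le_max_left _ _

theorem pvBestPair_fst (l : List Char) :
    ∀ mx cur, cur ≤ mx → (pvBestPair mx cur l).1 = max mx (pvM cur l) := by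
  induction l with
  | nil => intro mx cur h; simp [pvBestPair, pvM]; omega
  | cons c t ih =>
    intro mx cur h
    simp only [pvBestPair, pvM]
    split
    · rw [ih (max (cur + 1) mx) (cur + 1) (Nat.le_max_left _ _)]
      have := pvM_ge t (cur + 1)
      omega
    · rw [ih mx 0 (Nat.zero_le _)]
      have := pvM_ge t 0
      omega

-- A's Int fold equals the cast of the Nat shadow
theorem pvFold_cast (l : List Char) : ∀ mx cur : Nat,
    l.foldl
      (fun (st : Int × Int) ch =>
        if PySem.Chars.isdigit ch then (max (st.2 + 1) st.1, st.2 + 1) else (st.1, 0))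
      ((mx : Int), (cur : Int))
    = ((((pvBestPair mx cur l).1 : Nat) : Int), (((pvBestPair mx cur l).2 : Nat) : Int)) := by
  induction l with
  | nil => intro mx cur; simp [pvBestPair]
  | cons c t ih =>
    intro mx cur
    simp only [List.foldl, pvBestPair]
    split
    · have : ((cur : Int) + 1) = ((cur + 1 : Nat) : Int) := by push_cast; ring
      rw [this]
      have hmax : max (((cur + 1 : Nat) : Int)) ((mx : Nat) : Int)
          = ((max (cur + 1) mx : Nat) : Int) := by
        rw [Nat.cast_max]
      rw [hmax, ih]
    · simpa using ih mx 0

-- span decomposition of pvM along a maximal digit run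
theorem pvM_span (l : List Char) : ∀ cur,
    pvM cur l = max (cur + (l.takeWhile (fun x => PySem.Chars.isdigit x)).length)
                    (pvM 0 (l.dropWhile (fun x => PySem.Chars.isdigit x))) := by
  induction l with
  | nil => intro cur; simp [pvM]
  | cons c t ih =>
    intro cur
    by_cases h : PySem.Chars.isdigit c = true
    · simp only [pvM, h, if_pos, List.takeWhile_cons, List.dropWhile_cons]
      rw [ih (cur + 1)]
      simp only [List.length_cons]
      omega
    · simp [pvM, h]

-- leading non-digits do not affect pvM 0
theorem pvM_dropNondigit (l : List Char) :
    pvM 0 (l.dropWhile (fun x => !PySem.Chars.isdigit x)) = pvM 0 l := by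
  induction l with
  | nil => rfl
  | cons c t ih =>
    by_cases h : PySem.Chars.isdigit c = true
    · simp [h]
    · simp only [List.dropWhile_cons, h, Bool.not_false, if_true]
      rw [ih]
      simp [pvM, h]

theorem pvFoldRuns (n : Nat) : ∀ (l : List Char), l.length ≤ n → ∀ a : Nat,
    (pvDigitRunLens l).foldl max a = max a (pvM 0 l) := by
  induction n with
  | zero =>
    intro l hl a
    have : l = [] := List.length_eq_zero_iff.mp (Nat.le_zero.mp hl)
    subst this; rw [pvDigitRunLens]; simp [pvM]
  | succ n ih =>
    intro l hl a
    match l with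
    | [] => rw [pvDigitRunLens]; simp [pvM]
    | c :: rest =>
      rw [pvDigitRunLens]
      by_cases h : PySem.Chars.isdigit c = true
      · simp only [h, if_pos]
        have hpred : (fun x => PySem.Chars.isdigit x == true)
            = (fun x => PySem.Chars.isdigit x) := by
          funext x; cases PySem.Chars.isdigit x <;> rfl
        rw [hpred]
        simp only [List.foldl]
        rw [ih (rest.dropWhile (fun x => PySem.Chars.isdigit x))
            (le_trans (List.length_dropWhile_le _ _) (Nat.succ_le_succ_iff.mp hl))]
        have hm : pvM 0 (c :: rest)
            = max (1 + (rest.takeWhile (fun x => PySem.Chars.isdigit x)).length)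
                  (pvM 0 (rest.dropWhile (fun x => PySem.Chars.isdigit x))) := by
          simp only [pvM, h, if_pos]
          rw [pvM_span rest 1]
        rw [hm]; omega
      · simp only [h, if_neg, Bool.false_eq_true, not_false_iff]
        have hpred : (fun x => PySem.Chars.isdigit x == false)
            = (fun x => !PySem.Chars.isdigit x) := by
          funext x; cases PySem.Chars.isdigit x <;> rfl
        rw [hpred]
        rw [ih (rest.dropWhile (fun x => !PySem.Chars.isdigit x))
            (le_trans (List.length_dropWhile_le _ _) (Nat.succ_le_succ_iff.mp hl)) a]
        rw [pvM_dropNondigit rest]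
        have : pvM 0 (c :: rest) = pvM 0 rest := by simp [pvM, h]
        rw [this]

-- ===== VERDICT (by name: the statement is the Claim_ definition above) =====
theorem zadacha14_8_spec : Claim_equal_zadacha14_8 := by
  intro s _
  unfold Spec_zadacha14_8 zadacha14_8 zadacha14_8_alt
  have hA := pvFold_cast s.toList 0 0
  have : ((0 : Nat) : Int) = (0 : Int) := rfl
  rw [show ((0 : Int), (0 : Int)) = (((0 : Nat) : Int), ((0 : Nat) : Int)) from rfl, hA]
  have hB := pvFoldRuns s.toList.length s.toList (le_refl _) 0
  rw [hB]
  have h1 := pvBestPair_fst s.toList 0 0 (le_refl 0)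
  rw [h1]
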